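-- pv_equiv track=rewrite | github.com/Mathstao/gector | server.py | filter_white_corrections
-- ===== SOURCE A (Python) =====
-- def filter_white_corrections(corrections, whitelist):
--     if not whitelist:
--         return corrections
--     filtered_corrections = []
--     for c in corrections:
--         skip_flag = False
--         for word in whitelist:
--             word = word.lower()
--             if word in c[0].lower():
--                 skip_flag = True
--                 break
--         if not skip_flag:
--             filtered_corrections.append(c)
--     return filtered_corrections
-- ===== SOURCE B (Python) =====
-- def filter_white_corrections(corrections, whitelist):
--     if not whitelist:
--         return corrections
--     words = {w.lower() for w in whitelist}
--     lengths = {len(w) for w in words}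
--
--     def hit(head):
--         return any(head[i:i + L] in words
--                    for L in lengths
--                    for i in range(len(head) - L + 1))
--
--     return [c for c in corrections if not hit(c[0].lower())]
-- ===== Notes on version B (the rewrite author's own statement) =====
-- stated objective: alternative
-- what changed: B indexes the whitelist once into a hash set of lowercased words plus the set of their distinct lengths, and rejects a correction by enumerating the substrings of those lengths in its lowercased head with one O(1) set lookup each, so the per-correction inner scan over the whitelist disappears; Pre_ excludes inputs where A raises IndexError (an empty inner list while the whitelist is nonempty), where B raises too.
import Mathlib
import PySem

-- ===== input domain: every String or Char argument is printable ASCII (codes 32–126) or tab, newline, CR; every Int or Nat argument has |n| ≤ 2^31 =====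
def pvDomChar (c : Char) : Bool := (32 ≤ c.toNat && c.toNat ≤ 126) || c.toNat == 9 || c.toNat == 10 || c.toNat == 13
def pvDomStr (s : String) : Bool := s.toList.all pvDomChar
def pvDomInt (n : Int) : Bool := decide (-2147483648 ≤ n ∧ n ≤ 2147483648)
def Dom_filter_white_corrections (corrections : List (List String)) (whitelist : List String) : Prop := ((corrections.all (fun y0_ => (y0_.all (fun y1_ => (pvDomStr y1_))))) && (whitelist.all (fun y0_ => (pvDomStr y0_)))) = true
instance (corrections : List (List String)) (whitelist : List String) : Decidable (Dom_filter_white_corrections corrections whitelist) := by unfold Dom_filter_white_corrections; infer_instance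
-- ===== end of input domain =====

-- B indexes the whitelist once (hash set of lowercased words + set of their lengths) and tests
-- each correction by set lookups on its substrings of those lengths, instead of A's inner scan
-- over the whitelist with one substring search per word; equal return value proved on Pre_.

-- ===== PORT A =====
def filter_white_corrections (corrections : List (List String)) (whitelist : List String) : List (List String) :=
  if whitelist.isEmpty then corrections
  else
    corrections.foldl (fun acc c =>
      let skip := whitelist.any (fun word =>
        PySem.Str.isIn (PySem.Str.lower word) (PySem.Str.lower (PySem.List.pyGetD c 0 "")))
      if skip then acc else acc ++ [c]) []

-- ===== PORT B =====
def filter_white_corrections_alt (corrections : List (List String)) (whitelist : List String) : List (List String) :=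
  if whitelist.isEmpty then corrections
  else
    let words : PySem.Set String := PySem.Set.ofList (whitelist.map PySem.Str.lower)
    let lengths : PySem.Set Int := PySem.Set.ofList (words.map (fun w => (PySem.Str.len w : Int)))
    corrections.filter (fun c =>
      let head := PySem.Str.lower (PySem.List.pyGetD c 0 "")
      !(lengths.any (fun L =>
        (PySem.List.pyRange 0 ((PySem.Str.len head : Int) - L + 1) 1).any (fun i =>
          PySem.Set.contains words (PySem.Str.slice head (some i) (some (i + L)))))))

-- ===== PRECONDITION & SPEC =====
-- Pre_ excludes exactly the inputs on which the Python A raises IndexError (an empty inner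
-- list c, whose c[0] is taken, while the whitelist is nonempty); B raises there too.
def Pre_filter_white_corrections (corrections : List (List String)) (whitelist : List String) : Prop :=
  whitelist = [] ∨ ∀ c ∈ corrections, c ≠ []
instance (corrections : List (List String)) (whitelist : List String) : Decidable (Pre_filter_white_corrections corrections whitelist) := by unfold Pre_filter_white_corrections; infer_instance
def pvWitness_filter_white_corrections : List (List String) × List String :=
  ([["Hello world", "x"], ["abc"]], ["WORL", "zz"])

def Spec_filter_white_corrections (corrections : List (List String)) (whitelist : List String) (out : List (List String)) : Prop := out = filter_white_corrections_alt corrections whitelist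
instance (corrections : List (List String)) (whitelist : List String) (out : List (List String)) : Decidable (Spec_filter_white_corrections corrections whitelist out) := by unfold Spec_filter_white_corrections; infer_instance

-- ===== CLAIM (what is proved, stated in full; the proofs are below) =====
def Claim_equal_filter_white_corrections : Prop := ∀ (corrections : List (List String)) (whitelist : List String), Dom_filter_white_corrections corrections whitelist → Pre_filter_white_corrections corrections whitelist → Spec_filter_white_corrections corrections whitelist (filter_white_corrections corrections whitelist)

-- ===== LEMMAS AND PROOFS =====

-- B's length-indexed substring lookups on `head` hit iff some lowercased whitelist word is a
-- substring of `head` (A's per-word test).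

lemma hit_iff (whitelist : List String) (head : String) :
    ((PySem.Set.ofList ((PySem.Set.ofList (whitelist.map PySem.Str.lower)).map
        (fun w => (PySem.Str.len w : Int)))).any (fun L =>
      (PySem.List.pyRange 0 ((PySem.Str.len head : Int) - L + 1) 1).any (fun i =>
        PySem.Set.contains (PySem.Set.ofList (whitelist.map PySem.Str.lower))
          (PySem.Str.slice head (some i) (some (i + L))))))
      = whitelist.any (fun word => PySem.Str.isIn (PySem.Str.lower word) head) := by
  rw [Bool.eq_iff_iff]
  simp only [List.any_eq_true, PySem.List.mem_pyRange_one, PySem.Set.contains_iff,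
    PySem.Set.mem_ofList, List.mem_map]
  constructor
  · rintro ⟨L, ⟨a, -, hLa⟩, i, ⟨h0, hi⟩, word, hmem, hw⟩
    refine ⟨word, hmem, ?_⟩
    have hL0 : 0 ≤ L := by rw [← hLa]; exact Int.natCast_nonneg _
    rw [PySem.Str.isIn_eq, ← PySem.Chars.exists_prefix_drop_iff_isIn]
    refine ⟨i.toNat, ?_⟩
    have hteq : (PySem.Str.lower word).toList = (PySem.Str.slice head (some i) (some (i + L))).toList := by
      rw [hw]
    rw [PySem.Str.toList_slice, PySem.Chars.slice_eq_listSlice,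
      PySem.List.slice_toNat _ h0 (by omega)] at hteq
    rw [hteq]
    exact List.take_prefix _ _
  · rintro ⟨word, hmem, hw⟩
    rw [PySem.Str.isIn_eq, ← PySem.Chars.exists_prefix_drop_iff_isIn] at hw
    obtain ⟨j, hj⟩ := hw
    refine ⟨(((PySem.Str.lower word).toList.length : Int)),
      ⟨PySem.Str.lower word, ⟨word, hmem, rfl⟩, by rw [PySem.Str.len_eq]⟩, ?_⟩
    by_cases hnil : (PySem.Str.lower word).toList = []
    · refine ⟨0, ⟨le_refl _, ?_⟩, word, hmem, ?_⟩
      · rw [hnil, PySem.Str.len_eq]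
        simp
      · apply String.toList_inj.mp
        rw [PySem.Str.toList_slice, PySem.Chars.slice_eq_listSlice, hnil]
      
        rw [PySem.List.slice_toNat _ (le_refl 0) (by simp)]
        simp
    · have hlen : (PySem.Str.lower word).toList.length ≤ head.toList.length - j := by
        have := hj.length_le
        simpa using this
      have hwl : 0 < (PySem.Str.lower word).toList.length := List.length_pos_iff.mpr hnil
      have hjn : j + (PySem.Str.lower word).toList.length ≤ head.toList.length := by omega
      refine ⟨(j : Int), ⟨Int.natCast_nonneg _, ?_⟩, word, hmem, ?_⟩
      · rw [PySem.Str.len_eq]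
        omega
      · apply String.toList_inj.mp
        rw [PySem.Str.toList_slice, PySem.Chars.slice_eq_listSlice,
          PySem.List.slice_toNat _ (Int.natCast_nonneg _) (by positivity)]
        have hc : ((j : Int) + ((PySem.Str.lower word).toList.length : Int)).toNat - ((j:Int)).toNat
            = (PySem.Str.lower word).toList.length := by omega
        rw [hc]
        simp only [Int.toNat_natCast]
        exact List.prefix_iff_eq_take.mp hj

-- ===== VERDICT (by name: the statement is the Claim_ definition above) =====
theorem filter_white_corrections_spec : Claim_equal_filter_white_corrections := by
  intro corrections whitelist _ _
  unfold Spec_filter_white_corrections filter_white_corrections filter_white_corrections_alt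
  by_cases h : whitelist.isEmpty
  · simp [h]
  · simp only [h]
    have hbody : (fun (acc : List (List String)) (c : List String) =>
          if (whitelist.any (fun word =>
            PySem.Str.isIn (PySem.Str.lower word) (PySem.Str.lower (PySem.List.pyGetD c 0 "")))) then acc else acc ++ [c])
        = (fun acc c =>
          if (fun c => !(whitelist.any (fun word =>
            PySem.Str.isIn (PySem.Str.lower word) (PySem.Str.lower (PySem.List.pyGetD c 0 ""))))) c = true
          then acc ++ [(fun x => x) c] else acc) := by
      funext acc c
      cases hs : whitelist.any (fun word =>
        PySem.Str.isIn (PySem.Str.lower word) (PySem.Str.lower (PySem.List.pyGetD c 0 ""))) <;>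
        simp only [hs, Bool.not_false, Bool.not_true, if_true, if_false, Bool.false_eq_true]
    rw [hbody, PySem.List.foldl_append_if]
    simp only [hit_iff]
    simp
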